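-- pv_equiv track=rewrite | github.com/valerii15298/foobar.withgoogle | request1/solution.py | solution
-- ===== SOURCE A (Python) =====
-- def solution(index):
--     # Your code here
--     n = 20231
--     prime = [True for i in range(n + 1)]
--     p = 2
--     while (p * p <= n):
--         if (prime[p] == True):
--             for i in range(p * p, n + 1, p):
--                 prime[i] = False
--         p += 1
--     string = ''
--     # Concat all prime numbers
--     for p in range(2, n + 1):
--         if prime[p]:
--             string += str(p)
--     return string[index:index + 5]
-- ===== SOURCE B (Python) =====
-- def _has_divisor(p):
--     d = 2
--     while d * d <= p:
--         if p % d == 0: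
--             return True
--         d += 1
--     return False
--
--
-- def solution(index):
--     parts = [str(p) for p in range(2, 20232) if not _has_divisor(p)]
--     return ''.join(parts)[index:index + 5]
-- ===== Notes on version B (the rewrite author's own statement) =====
-- stated objective: alternative
-- what changed: Replaces the boolean sieve array (nested marking loops plus string concatenation catenated in a second scan) by per-number trial division over the same fixed range 2..20231 with a list comprehension and a single ''.join.
import Mathlib
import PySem

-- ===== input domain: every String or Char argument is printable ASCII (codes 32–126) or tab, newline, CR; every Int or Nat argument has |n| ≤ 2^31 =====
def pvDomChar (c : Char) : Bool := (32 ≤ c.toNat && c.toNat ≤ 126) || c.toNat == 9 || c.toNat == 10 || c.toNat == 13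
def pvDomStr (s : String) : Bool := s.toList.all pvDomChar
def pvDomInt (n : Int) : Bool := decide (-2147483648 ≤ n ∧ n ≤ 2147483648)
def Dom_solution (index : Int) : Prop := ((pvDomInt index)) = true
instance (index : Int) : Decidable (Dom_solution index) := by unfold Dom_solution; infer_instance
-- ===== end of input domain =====

-- B replaces A's Eratosthenes sieve + repeated string concatenation by trial division over the
-- same fixed range 2..20231 with a single join (objective: alternative, not claimed faster).
-- Python strings are handled on the List Char side, as PySem prescribes.

-- ===== PORT A =====
-- A's while-loop (sieve marking); the Nat fuel only makes the loop total, the loop itself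
-- stops when p*p > n, and it is called with more fuel than the loop can consume
def solutionSieve (n : Int) : Nat → List Bool → Int → List Bool
  | 0, prime, _ => prime
  | fuel+1, prime, p =>
    if p * p ≤ n then
      let prime' := if PySem.List.pyGetD prime p false = true then
          (PySem.List.pyRange (p*p) (n+1) p).foldl (fun pr i => PySem.List.pySetD pr i false) prime
        else prime
      solutionSieve n fuel prime' (p+1)
    else prime

def solution (index : Int) : String :=
  String.ofList (PySem.List.slice
    ((PySem.List.pyRange 2 ((20231:Int)+1) 1).foldl
      (fun s p => if PySem.List.pyGetD
          (solutionSieve 20231 ((20231:Int).toNat + 1)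
            ((PySem.List.pyRange 0 ((20231:Int)+1) 1).map (fun _ => true)) 2) p false = true
        then s ++ PySem.Int.toChars p else s) [])
    (some index) (some (index + 5)))

-- ===== PORT B =====
-- B's _has_divisor while-loop; the Nat fuel only makes the loop total
def solutionHasDiv (p : Int) : Nat → Int → Bool
  | 0, _ => false
  | fuel+1, d =>
    if d * d ≤ p then
      if PySem.Int.mod p d = 0 then true else solutionHasDiv p fuel (d+1)
    else false

def solution_alt (index : Int) : String :=
  String.ofList (PySem.List.slice
    (PySem.Chars.join []
      (((PySem.List.pyRange 2 20232 1).filter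
        (fun p => !solutionHasDiv p (p.toNat + 1) 2)).map (fun p => PySem.Int.toChars p)))
    (some index) (some (index + 5)))

-- ===== PRECONDITION & SPEC =====
def Spec_solution (index : Int) (out : String) : Prop := out = solution_alt index
instance (index : Int) (out : String) : Decidable (Spec_solution index out) := by unfold Spec_solution; infer_instance

-- ===== CLAIM (what is proved, stated in full; the proofs are below) =====
def Claim_equal_solution : Prop := ∀ (index : Int), Dom_solution index → Spec_solution index (solution index)

-- ===== LEMMAS AND PROOFS =====

-- a marking pass keeps the length and clears exactly the listed (nonnegative) indices
theorem pv_mark_length (js : List Int) (pr : List Bool) :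
    (js.foldl (fun pr i => PySem.List.pySetD pr i false) pr).length = pr.length := by
  induction js generalizing pr with
  | nil => rfl
  | cons j t ih => simp [List.foldl_cons, ih, PySem.List.length_pySetD]

theorem pv_mark_getD (js : List Int) (pr : List Bool) (hjs : ∀ j ∈ js, 0 ≤ j)
    (k : Nat) (hk : k < pr.length) :
    (js.foldl (fun pr i => PySem.List.pySetD pr i false) pr).getD k true =
      if (k : Int) ∈ js then false else pr.getD k true := by
  induction js generalizing pr with
  | nil => simp
  | cons j t ih =>
    have hj0 : 0 ≤ j := hjs j (by simp)
    rw [List.foldl_cons, ih _ (fun x hx => hjs x (by simp [hx])) (by simpa [PySem.List.length_pySetD] using hk)]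
    rw [PySem.List.pySetD_of_nonneg _ _ hj0]
    by_cases hkj : (k : Int) = j
    · have : j.toNat = k := by omega
      simp [hkj, this, List.getD, hk]
    · have : j.toNat ≠ k := by omega
      simp [List.mem_cons, hkj, List.getD, List.getElem?_set_ne this]

theorem pv_getD_const (l : List Int) (k : Nat) : (l.map (fun _ => true)).getD k true = true := by
  induction l generalizing k with
  | nil => simp
  | cons a t ih => cases k <;> simp [List.getD]

-- the sieve invariant: when base p is up next, entry k is cleared iff some prime q < p
-- with q*q ≤ n divides k and q*q ≤ k
def SieveInv (n p : Int) (S : List Bool) : Prop :=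
  S.length = (n+1).toNat ∧ ∀ k : Nat, (k : Int) ≤ n →
    (S.getD k true = false ↔
      ∃ q : Nat, Nat.Prime q ∧ (q : Int) < p ∧ ((q*q : Nat) : Int) ≤ n ∧ q ∣ k ∧ q*q ≤ k)

-- running A's while-loop from an invariant state (with enough fuel) yields the full characterisation
theorem pv_sieve_run (n : Int) (fuel : Nat) (p : Int) (S : List Bool)
    (hp : 2 ≤ p) (hinv : SieveInv n p S) (hfuel : n < p + fuel) :
    (solutionSieve n fuel S p).length = (n+1).toNat ∧ ∀ k : Nat, (k : Int) ≤ n →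
      ((solutionSieve n fuel S p).getD k true = false ↔
        ∃ q : Nat, Nat.Prime q ∧ ((q*q : Nat) : Int) ≤ n ∧ q ∣ k ∧ q*q ≤ k) := by
  induction fuel generalizing p S with
  | zero =>
    obtain ⟨hlen, hchar⟩ := hinv
    refine ⟨hlen, fun k hk => ?_⟩
    rw [solutionSieve, hchar k hk]
    constructor
    · rintro ⟨q, h1, h2, h3, h4, h5⟩; exact ⟨q, h1, h3, h4, h5⟩
    · rintro ⟨q, h1, h3, h4, h5⟩
      refine ⟨q, h1, ?_, h3, h4, h5⟩
      have hq2 : 2 ≤ q := h1.two_le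
      have hqq : (q : Int) ≤ ((q*q : Nat) : Int) := by push_cast; nlinarith
      push_cast at hfuel hqq ⊢
      omega
  | succ fuel ih =>
    rw [solutionSieve]
    by_cases hcond : p * p ≤ n
    · rw [if_pos hcond]
      obtain ⟨hlen, hchar⟩ := hinv
      have hppn : p ≤ n := by nlinarith
      have hplen : p.toNat < S.length := by rw [hlen]; omega
      have hc : ((p.toNat : Int)) = p := by omega
      have hread : PySem.List.pyGetD S p false = S.getD p.toNat true := by
        rw [PySem.List.pyGetD_eq_getElem S false (by omega) (by rw [hlen]; omega),
          List.getD_eq_getElem S true hplen]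
      have hstep : SieveInv n (p+1)
          (if PySem.List.pyGetD S p false = true then
            (PySem.List.pyRange (p*p) (n+1) p).foldl (fun pr i => PySem.List.pySetD pr i false) S
          else S) := by
        by_cases ht : PySem.List.pyGetD S p false = true
        · rw [if_pos ht]
          have hprime : Nat.Prime p.toNat := by
            by_contra hnp
            have h1 : p.toNat ≠ 1 := by omega
            have hq := Nat.minFac_prime h1
            have hdvd := Nat.minFac_dvd p.toNat
            have hsq : p.toNat.minFac ^ 2 ≤ p.toNat := Nat.minFac_sq_le_self (by omega) hnp
            have hsq' : (p.toNat.minFac * p.toNat.minFac : Nat) ≤ p.toNat := by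
              simpa [pow_two] using hsq
            have hlt : p.toNat.minFac < p.toNat := by
              rcases lt_or_ge p.toNat.minFac p.toNat with h | h
              · exact h
              · have heq : p.toNat.minFac = p.toNat := le_antisymm (Nat.minFac_le (by omega)) h
                exact absurd (heq ▸ hq) hnp
            have hfalse : S.getD p.toNat true = false := by
              rw [hchar p.toNat (by omega)]
              refine ⟨p.toNat.minFac, hq, ?_, ?_, hdvd, hsq'⟩
              · rw [← hc]; exact_mod_cast hlt
              · push_cast; push_cast at hc; omega
            rw [hread, hfalse] at ht
            exact absurd ht (by simp)
          have hjs0 : ∀ j ∈ PySem.List.pyRange (p*p) (n+1) p, 0 ≤ j := by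
            intro j hj
            have := ((PySem.List.mem_pyRange_iff_of_pos (by omega : (0:Int) < p) j).mp hj).1
            nlinarith
          refine ⟨by rw [pv_mark_length]; exact hlen, fun k hk => ?_⟩
          have hklen : k < S.length := by rw [hlen]; omega
          rw [pv_mark_getD _ _ hjs0 k hklen]
          by_cases hmem : (k:Int) ∈ PySem.List.pyRange (p*p) (n+1) p
          · rw [if_pos hmem]
            obtain ⟨hm1, hm2, hm3⟩ :=
              (PySem.List.mem_pyRange_iff_of_pos (by omega : (0:Int) < p) k).mp hmem
            have hpd : p ∣ (k:Int) := by
              have heq : (k:Int) = ((k:Int) - p*p) + p*p := by ring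
              rw [heq]; exact dvd_add hm3 ⟨p, rfl⟩
            have hnd : p.toNat ∣ k := by
              have h := Int.natAbs_dvd_natAbs.mpr hpd
              have h1 : p.natAbs = p.toNat := by omega
              have h2 : ((k:Int)).natAbs = k := Int.natAbs_natCast k
              rwa [h1, h2] at h
            simp only [true_iff]
            refine ⟨p.toNat, hprime, by omega, ?_, hnd, ?_⟩
            · push_cast; rw [hc]; exact hcond
            · have : ((p.toNat * p.toNat : Nat) : Int) ≤ (k : Int) := by push_cast; rw [hc]; exact hm1
              exact_mod_cast this
          · rw [if_neg hmem, hchar k hk]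
            constructor
            · rintro ⟨q, h1, h2, h3, h4, h5⟩; exact ⟨q, h1, by omega, h3, h4, h5⟩
            · rintro ⟨q, h1, h2, h3, h4, h5⟩
              rcases lt_or_ge (q:Int) p with hqp | hqp
              · exact ⟨q, h1, hqp, h3, h4, h5⟩
              · exfalso
                have hqep : (q:Int) = p := by omega
                apply hmem
                rw [PySem.List.mem_pyRange_iff_of_pos (by omega : (0:Int) < p)]
                have hqk : ((q*q : Nat) : Int) ≤ (k:Int) := by exact_mod_cast h5
                push_cast at hqk
                rw [hqep] at hqk
                refine ⟨hqk, by omega, ?_⟩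
                have hqd : (q:Int) ∣ (k:Int) := Int.natCast_dvd_natCast.mpr h4
                rw [hqep] at hqd
                exact dvd_sub hqd ⟨p, rfl⟩
        · rw [if_neg ht]
          rw [hread] at ht
          have hpfalse : S.getD p.toNat true = false := by
            cases h : S.getD p.toNat true
            · rfl
            · exact absurd h ht
          obtain ⟨r, hr1, hr2, hr3, hr4, hr5⟩ := (hchar p.toNat (by omega)).mp hpfalse
          refine ⟨hlen, fun k hk => ?_⟩
          rw [hchar k hk]
          constructor
          · rintro ⟨q, h1, h2, h3, h4, h5⟩; exact ⟨q, h1, by omega, h3, h4, h5⟩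
          · rintro ⟨q, h1, h2, h3, h4, h5⟩
            rcases lt_or_ge (q:Int) p with hqp | hqp
            · exact ⟨q, h1, hqp, h3, h4, h5⟩
            · have hqp' : q = p.toNat := by omega
              refine ⟨r, hr1, hr2, hr3, hr4.trans (hqp' ▸ h4), ?_⟩
              have hqk : q ≤ k := Nat.le_of_dvd (by nlinarith [h1.two_le]) h4
              have hpk : p.toNat ≤ k := hqp' ▸ hqk
              omega
      exact ih (p+1) _ (by omega) hstep (by push_cast at hfuel ⊢; omega)
    · rw [if_neg hcond]
      obtain ⟨hlen, hchar⟩ := hinv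
      refine ⟨hlen, fun k hk => ?_⟩
      rw [hchar k hk]
      constructor
      · rintro ⟨q, h1, h2, h3, h4, h5⟩; exact ⟨q, h1, h3, h4, h5⟩
      · rintro ⟨q, h1, h3, h4, h5⟩
        refine ⟨q, h1, ?_, h3, h4, h5⟩
        have hq2 : 2 ≤ q := h1.two_le
        push_cast at h3
        nlinarith

-- the final sieve entry at 2 ≤ k ≤ n is the primality of k
theorem pv_sieve_final (n : Int) (S : List Bool)
    (hchar : ∀ k : Nat, (k : Int) ≤ n →
      (S.getD k true = false ↔
        ∃ q : Nat, Nat.Prime q ∧ ((q*q : Nat) : Int) ≤ n ∧ q ∣ k ∧ q*q ≤ k))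
    (k : Nat) (hk2 : 2 ≤ k) (hkn : (k : Int) ≤ n) :
    S.getD k true = decide (Nat.Prime k) := by
  by_cases hpr : Nat.Prime k
  · have : ¬ S.getD k true = false := by
      rw [hchar k hkn]
      rintro ⟨q, h1, h2, h3, h4⟩
      rcases (Nat.Prime.eq_one_or_self_of_dvd hpr _ h3) with h | h
      · exact absurd (h ▸ h1) Nat.not_prime_one
      · subst h; nlinarith
    rw [decide_eq_true hpr]
    cases h : S.getD k true
    · exact absurd h this
    · rfl
  · have : S.getD k true = false := by
      rw [hchar k hkn]
      have h1 : k ≠ 1 := by omega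
      have hq := Nat.minFac_prime h1
      have hdvd := Nat.minFac_dvd k
      have hsq : k.minFac ^ 2 ≤ k := Nat.minFac_sq_le_self (by omega) hpr
      have hsq' : k.minFac * k.minFac ≤ k := by simpa [pow_two] using hsq
      exact ⟨k.minFac, hq, by push_cast at hkn ⊢; omega, hdvd, hsq'⟩
    rw [decide_eq_false hpr, this]

-- B's trial-division loop finds a divisor iff one exists
theorem pv_hasdiv_iff (p : Int) (fuel : Nat) (d : Int) (hd : 2 ≤ d) (hfuel : p < d + fuel) :
    solutionHasDiv p fuel d = true ↔ ∃ e : Int, d ≤ e ∧ e * e ≤ p ∧ e ∣ p := by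
  induction fuel generalizing d with
  | zero =>
    simp only [solutionHasDiv, Bool.false_eq_true, false_iff]
    rintro ⟨e, he1, he2, -⟩
    push_cast at hfuel
    nlinarith [mul_self_nonneg (e-1)]
  | succ fuel ih =>
    rw [solutionHasDiv]
    by_cases h1 : d * d ≤ p
    · rw [if_pos h1]
      by_cases h2 : PySem.Int.mod p d = 0
      · rw [if_pos h2]
        simp only [true_iff]
        exact ⟨d, le_refl d, h1, (PySem.Int.mod_eq_zero_iff_dvd p d).mp h2⟩
      · rw [if_neg h2, ih (d+1) (by omega) (by omega)]
        constructor
        · rintro ⟨e, he1, he2, he3⟩; exact ⟨e, by omega, he2, he3⟩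
        · rintro ⟨e, he1, he2, he3⟩
          refine ⟨e, ?_, he2, he3⟩
          rcases eq_or_lt_of_le he1 with heq | hlt
          · exact absurd ((PySem.Int.mod_eq_zero_iff_dvd p d).mpr (heq ▸ he3)) h2
          · omega
    · rw [if_neg h1]
      simp only [Bool.false_eq_true, false_iff]
      rintro ⟨e, he1, he2, -⟩
      nlinarith [mul_le_mul he1 he1 (by omega) (by omega : (0:Int) ≤ e)]

-- hence _has_divisor decides primality
theorem pv_hasdiv_prime (p : Int) (hp : 2 ≤ p) :
    (!solutionHasDiv p (p.toNat + 1) 2) = decide (Nat.Prime p.toNat) := by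
  have hiff := pv_hasdiv_iff p (p.toNat + 1) 2 (by omega) (by omega)
  by_cases hpr : Nat.Prime p.toNat
  · have : solutionHasDiv p (p.toNat + 1) 2 = false := by
      rw [← Bool.not_eq_true, hiff]
      rintro ⟨e, he1, he2, he3⟩
      have he0 : 0 ≤ e := by omega
      have hdvd : e.natAbs ∣ p.natAbs := Int.natAbs_dvd_natAbs.mpr he3
      have hdvd' : e.toNat ∣ p.toNat := by
        have h1 : e.natAbs = e.toNat := by omega
        have h2 : p.natAbs = p.toNat := by omega
        rwa [h1, h2] at hdvd
      rcases (Nat.Prime.eq_one_or_self_of_dvd hpr _ hdvd') with h | h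
      · omega
      · have hep : e = p := by omega
        subst hep
        nlinarith
    simp [this, hpr]
  · have : solutionHasDiv p (p.toNat + 1) 2 = true := by
      rw [hiff]
      have h1 : p.toNat ≠ 1 := by omega
      have hq := Nat.minFac_prime h1
      have hdvd := Nat.minFac_dvd p.toNat
      have hsq : p.toNat.minFac ^ 2 ≤ p.toNat := Nat.minFac_sq_le_self (by omega) hpr
      refine ⟨(p.toNat.minFac : Int), by exact_mod_cast hq.two_le, ?_, ?_⟩
      · have h2 : (p.toNat.minFac * p.toNat.minFac : Nat) ≤ p.toNat := by
          simpa [pow_two] using hsq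
        have h3 : ((p.toNat.minFac * p.toNat.minFac : Nat) : Int) = (p.toNat.minFac : Int) * (p.toNat.minFac : Int) := by push_cast; ring
        omega
      · have : (p.toNat : Int) = p := by omega
        exact this ▸ Int.natCast_dvd_natCast.mpr hdvd
    simp [this, hpr]

-- joining with the empty separator is flattening
theorem pv_join_nil (parts : List (List Char)) : PySem.Chars.join [] parts = parts.flatten := by
  simp only [PySem.Chars.join, List.intercalate]
  induction parts with
  | nil => simp
  | cons a t ih =>
    cases t with
    | nil => simp
    | cons b t2 =>
      rw [List.intersperse_cons₂]
      simp only [List.flatten_cons, List.nil_append] at ih ⊢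
      rw [ih]

-- A's accumulation loop is filter-then-flatMap
theorem pv_foldl_if_append (c : Int → Bool) (f : Int → List Char) (l : List Int) (acc : List Char) :
    l.foldl (fun s p => if c p = true then s ++ f p else s) acc =
      acc ++ (l.filter c).flatMap f := by
  induction l generalizing acc with
  | nil => simp
  | cons a t ih =>
    by_cases h : c a = true <;> simp [List.foldl_cons, h, ih]

-- the two programs build the same character list before slicing
theorem pv_chars_eq :
    (PySem.List.pyRange 2 ((20231:Int)+1) 1).foldl
      (fun s p => if PySem.List.pyGetD
            (solutionSieve 20231 ((20231:Int).toNat + 1)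
              ((PySem.List.pyRange 0 ((20231:Int)+1) 1).map (fun _ => true)) 2) p false = true
          then s ++ PySem.Int.toChars p else s) [] =
    PySem.Chars.join []
      (((PySem.List.pyRange 2 20232 1).filter
        (fun p => !solutionHasDiv p (p.toNat + 1) 2)).map (fun p => PySem.Int.toChars p)) := by
  have hinit : ((PySem.List.pyRange 0 ((20231:Int)+1) 1).map (fun _ => true)).length
      = ((20231:Int)+1).toNat := by
    rw [List.length_map, PySem.List.length_pyRange_one]; norm_num
  have hrun := pv_sieve_run 20231 ((20231:Int).toNat + 1) 2
    ((PySem.List.pyRange 0 ((20231:Int)+1) 1).map (fun _ => true)) (by omega)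
    ⟨hinit, by
      intro k hk
      rw [pv_getD_const]
      simp only [Bool.true_eq_false, false_iff]
      rintro ⟨q, h1, h2, -⟩
      have := h1.two_le
      omega⟩
    (by omega)
  obtain ⟨hlen, hchar⟩ := hrun
  rw [pv_foldl_if_append, pv_join_nil, List.nil_append, ← List.flatMap_def]
  have hrange : PySem.List.pyRange 2 ((20231:Int)+1) 1 = PySem.List.pyRange 2 20232 1 := by norm_num
  rw [hrange]
  have hfilter : (PySem.List.pyRange 2 20232 1).filter
      (fun p => PySem.List.pyGetD
        (solutionSieve 20231 ((20231:Int).toNat + 1)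
          ((PySem.List.pyRange 0 ((20231:Int)+1) 1).map (fun _ => true)) 2) p false)
      = (PySem.List.pyRange 2 20232 1).filter (fun p => !solutionHasDiv p (p.toNat + 1) 2) := by
    apply List.filter_congr
    intro p hp
    have hmem := (PySem.List.mem_pyRange_one).mp hp
    have hp2 : 2 ≤ p := hmem.1
    have hplt : p < 20232 := hmem.2
    have hread : PySem.List.pyGetD (solutionSieve 20231 ((20231:Int).toNat + 1)
        ((PySem.List.pyRange 0 ((20231:Int)+1) 1).map (fun _ => true)) 2) p false
        = (solutionSieve 20231 ((20231:Int).toNat + 1)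
        ((PySem.List.pyRange 0 ((20231:Int)+1) 1).map (fun _ => true)) 2).getD p.toNat true := by
      rw [PySem.List.pyGetD_eq_getElem _ false (by omega) (by rw [hlen]; omega),
        List.getD_eq_getElem _ true (by rw [hlen]; omega)]
    rw [hread, pv_sieve_final 20231 _ hchar p.toNat (by omega) (by omega),
      pv_hasdiv_prime p hp2]
  rw [hfilter]

-- ===== VERDICT (by name: the statement is the Claim_ definition above) =====
theorem solution_spec : Claim_equal_solution := by
  intro index _
  unfold Spec_solution solution solution_alt
  rw [pv_chars_eq]
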